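-- pv_equiv track=rewrite | github.com/Jeongseulho/CSstudy | seulho/별찍기_10.py | draw_stars
-- ===== SOURCE A (Python) =====
-- def draw_stars(n):
--     if n == 3:
--         return ['***', '* *', '***']
--
--     Stars = draw_stars(n // 3)  # if Starts 가 ['***', '* *', '***']인 N=3에서 모양이면
--     L = []
--
--     for star in Stars:
--         up = star * 3  # 여기서 up = ['***' x3, '* *' x3, '***' x3]
--         L.append(up)
--     for star in Stars:
--         # 여기서 mid = ['***' , ' ' x9, '***']
--         mid = star + ' ' * (n // 3) + star
--         L.append(mid)
--     for star in Stars: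
--         down = star * 3  # 여기서 down = ['***' x3, '* *' x3, '***' x3]
--         L.append(down)
--
--     return L
-- ===== SOURCE B (Python) =====
-- def draw_stars(n):
--     # bottom-up: collect the size chain, then grow the pattern from the 3x3 seed
--     sizes = []
--     m = n
--     while m > 3:
--         sizes.append(m)
--         m //= 3
--     if m != 3:
--         raise ValueError('n must reduce to 3 by repeated floor division by 3')
--     pat = ['***', '* *', '***']
--     for m in reversed(sizes):
--         gap = ' ' * (m // 3)
--         pat = ([s * 3 for s in pat]
--                + [s + gap + s for s in pat]
--                + [s * 3 for s in pat])
--     return pat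
-- ===== Notes on version B (the rewrite author's own statement) =====
-- stated objective: alternative
-- what changed: Replaces the top-down recursion with an explicit bottom-up loop: B collects the descending size chain n, n//3, ... (validating it ends at 3), then grows the 3x3 seed pattern iteratively from smallest to largest size.
import Mathlib
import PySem

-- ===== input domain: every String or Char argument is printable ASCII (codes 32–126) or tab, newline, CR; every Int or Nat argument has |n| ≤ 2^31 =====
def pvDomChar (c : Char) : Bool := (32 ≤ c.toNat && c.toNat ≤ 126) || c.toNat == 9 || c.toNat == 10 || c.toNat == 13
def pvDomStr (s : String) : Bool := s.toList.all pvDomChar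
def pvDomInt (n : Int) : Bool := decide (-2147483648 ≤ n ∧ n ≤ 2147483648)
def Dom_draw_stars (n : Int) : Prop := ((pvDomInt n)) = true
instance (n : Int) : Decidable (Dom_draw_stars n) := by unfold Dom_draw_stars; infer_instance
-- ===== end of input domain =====

-- B replaces A's top-down recursion by a bottom-up loop over the explicit size chain; objective: alternative decomposition (same cost).

-- Python's  s * k  on a string (k ≤ 0 gives ""); shared primitive of both ports
def pyStrMul (s : String) (k : Int) : String :=
  String.ofList ((List.replicate k.toNat s.toList).flatten)

-- ===== PORT A =====
-- A's recursion does not terminate structurally on Int; fuel (n.natAbs + 1) is a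
-- totality guard only — inside Pre_ it never runs out (proved below).
def drawStarsRec : Nat → Int → List String
  | 0, _ => []
  | fuel + 1, n =>
    if n = 3 then ["***", "* *", "***"]
    else
      let stars := drawStarsRec fuel (PySem.Int.floordiv n 3)
      let L : List String := []
      let L := stars.foldl (fun L star => L ++ [pyStrMul star 3]) L
      let L := stars.foldl
        (fun L star => L ++ [star ++ pyStrMul " " (PySem.Int.floordiv n 3) ++ star]) L
      let L := stars.foldl (fun L star => L ++ [pyStrMul star 3]) L
      L

def draw_stars (n : Int) : List String := drawStarsRec (n.natAbs + 1) n

-- ===== PORT B =====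
-- B's while loop (returns the collected sizes and the final m), with a
-- fuel-style totality guard only; inside Pre_ it never runs out (proved below).
def sizesLoop : Nat → Int → List Int × Int
  | 0, m => ([], m)
  | fuel + 1, m =>
    if 3 < m then
      let r := sizesLoop fuel (PySem.Int.floordiv m 3)
      (m :: r.1, r.2)
    else ([], m)

def draw_stars_alt (n : Int) : List String :=
  let r := sizesLoop (n.natAbs + 1) n
  if r.2 ≠ 3 then []  -- Python B raises ValueError here; these inputs are outside Pre_
  else
  r.1.reverse.foldl
    (fun pat m =>
      let gap := pyStrMul " " (PySem.Int.floordiv m 3)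
      (pat.map (fun s => pyStrMul s 3)) ++ (pat.map (fun s => s ++ gap ++ s))
        ++ (pat.map (fun s => pyStrMul s 3)))
    ["***", "* *", "***"]

-- ===== PRECONDITION & SPEC =====
-- Pre_ excludes exactly the n on which A RAISES (RecursionError: the chain n, n//3, …
-- never hits 3); A returns precisely when 3^(k+1) ≤ n ≤ 4·3^k − 1 for some k.
-- The clause k < n.natAbs.log2 + 1 is implied by 3^(k+1) ≤ n (proved in
-- pre_k_bound below); it excludes no input and only makes the ∃ decidable (fast).
def Pre_draw_stars (n : Int) : Prop :=
  ∃ k : Nat, k < n.natAbs.log2 + 1 ∧ (3 : Int) ^ (k + 1) ≤ n ∧ n ≤ 4 * 3 ^ k - 1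
instance (n : Int) : Decidable (Pre_draw_stars n) := by unfold Pre_draw_stars; infer_instance
def pvWitness_draw_stars : Int := (9)

def Spec_draw_stars (n : Int) (out : List String) : Prop := out = draw_stars_alt n
instance (n : Int) (out : List String) : Decidable (Spec_draw_stars n out) := by unfold Spec_draw_stars; infer_instance

-- ===== CLAIM (what is proved, stated in full; the proofs are below) =====
def Claim_equal_draw_stars : Prop :=
  ∀ (n : Int), Dom_draw_stars n → Pre_draw_stars n → Spec_draw_stars n (draw_stars n)

-- ===== LEMMAS AND PROOFS =====

-- the decidability clause is free: any k with 3^(k+1) ≤ n satisfies it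
lemma pre_k_bound (k : Nat) (n : Int) (h : (3 : Int) ^ (k + 1) ≤ n) :
    k < n.natAbs.log2 + 1 := by
  have h2 : (2 : Int) ^ (k + 1) ≤ n := by
    calc (2 : Int) ^ (k + 1) ≤ 3 ^ (k + 1) := by
          exact pow_le_pow_left₀ (by norm_num) (by norm_num) _
      _ ≤ n := h
  have hpos : (0 : Int) < n := lt_of_lt_of_le (pow_pos (by norm_num) _) h2
  have hn : 2 ^ (k + 1) ≤ n.natAbs := by
    have h' : ((2 ^ (k + 1) : Nat) : Int) ≤ (n.natAbs : Int) := by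
      rw [Int.natAbs_of_nonneg hpos.le]; push_cast; exact h2
    exact_mod_cast h'
  have hlog : k + 1 ≤ n.natAbs.log2 := (Nat.le_log2 (by omega)).mpr hn
  omega

-- Pre_ steps down the chain: either n = 3 or n > 3 and the quotient is again in Pre_.
lemma pre_step (n : Int) (h : Pre_draw_stars n) :
    n = 3 ∨ (3 < n ∧ Pre_draw_stars (PySem.Int.floordiv n 3)) := by
  obtain ⟨k, -, hlo, hhi⟩ := h
  cases k with
  | zero => left; simpa using le_antisymm (by simpa using hhi) (by simpa using hlo)
  | succ j =>
    right
    have h9 : (9 : Int) ≤ 3 ^ (j + 1 + 1) := by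
      calc (9 : Int) = 9 * 1 := by ring
        _ ≤ 9 * 3 ^ j := by
          have : (1 : Int) ≤ 3 ^ j := one_le_pow₀ (by norm_num)
          nlinarith
        _ = 3 ^ (j + 1 + 1) := by ring
    have hlo' : (3 : Int) ^ (j + 1) ≤ PySem.Int.floordiv n 3 := by
      rw [PySem.Int.le_floordiv_iff_mul_le (by norm_num)]
      calc (3 : Int) ^ (j + 1) * 3 = 3 ^ (j + 1 + 1) := by ring
        _ ≤ n := hlo
    refine ⟨?_, j, pre_k_bound j _ hlo', hlo', ?_⟩
    · have : (3:Int)^(j+1+1) ≤ n := hlo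
      omega
    · have : PySem.Int.floordiv n 3 < 4 * 3 ^ j := by
        rw [PySem.Int.floordiv_lt_iff_lt_mul (by norm_num)]
        calc n ≤ 4 * 3 ^ (j + 1) - 1 := hhi
          _ < 4 * 3 ^ (j + 1) := by omega
          _ = 4 * 3 ^ j * 3 := by ring
      omega

lemma floordiv_facts (n : Int) (h : 3 < n) :
    0 ≤ PySem.Int.floordiv n 3 ∧ (PySem.Int.floordiv n 3).natAbs < n.natAbs := by
  rw [PySem.Int.floordiv_eq_ediv_of_pos (by norm_num)]
  omega

lemma sizesLoop_succ (f : Nat) (m : Int) :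
    sizesLoop (f + 1) m =
      if 3 < m then
        ((m :: (sizesLoop f (PySem.Int.floordiv m 3)).1), (sizesLoop f (PySem.Int.floordiv m 3)).2)
      else ([], m) := rfl

-- sizesLoop does not depend on the fuel once it is at least |m|
lemma sizesLoop_fuel : ∀ (f g : Nat) (m : Int), m.natAbs ≤ f → m.natAbs ≤ g →
    sizesLoop (f + 1) m = sizesLoop (g + 1) m := by
  intro f
  induction f with
  | zero =>
    intro g m hf hg
    have : ¬ (3 < m) := by omega
    simp [sizesLoop, this]
  | succ f ih =>
    intro g m hf hg
    by_cases h3 : 3 < m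
    · obtain ⟨h0, hlt⟩ := floordiv_facts m h3
      obtain ⟨g', rfl⟩ : ∃ g', g = g' + 1 := ⟨g - 1, by omega⟩
      rw [sizesLoop_succ (f+1) m, sizesLoop_succ (g'+1) m, if_pos h3, if_pos h3,
        ih g' _ (by omega) (by omega)]
    · simp [sizesLoop, h3]

-- B satisfies A's recurrence on n > 3 (with enough fuel)
lemma alt_step (n : Int) (h3 : 3 < n) :
    draw_stars_alt n =
      (let pat := draw_stars_alt (PySem.Int.floordiv n 3)
       let gap := pyStrMul " " (PySem.Int.floordiv n 3)
       (pat.map (fun s => pyStrMul s 3)) ++ (pat.map (fun s => s ++ gap ++ s))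
         ++ (pat.map (fun s => pyStrMul s 3))) := by
  obtain ⟨h0, hlt⟩ := floordiv_facts n h3
  have hnat : 1 ≤ n.natAbs := by omega
  have hfuel : sizesLoop (n.natAbs + 1) n
      = ((n :: (sizesLoop ((PySem.Int.floordiv n 3).natAbs + 1) (PySem.Int.floordiv n 3)).1),
         (sizesLoop ((PySem.Int.floordiv n 3).natAbs + 1) (PySem.Int.floordiv n 3)).2) := by
    obtain ⟨f, hf⟩ : ∃ f, n.natAbs = f + 1 := ⟨n.natAbs - 1, by omega⟩
    rw [hf, sizesLoop_succ, if_pos h3, sizesLoop_fuel f _ _ (by omega) (le_refl _)]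
  simp only [draw_stars_alt, hfuel]
  by_cases hm : (sizesLoop ((n / 3).natAbs + 1) (n / 3)).2 = 3
  · simp [hm]
  · simp [hm]

lemma main_lemma : ∀ (f : Nat) (n : Int), Pre_draw_stars n → n.natAbs ≤ f →
    drawStarsRec (f + 1) n = draw_stars_alt n := by
  intro f
  induction f with
  | zero =>
    intro n hp hf
    rcases pre_step n hp with h | ⟨h3, -⟩ <;> omega
  | succ f ih =>
    intro n hp hf
    rcases pre_step n hp with rfl | ⟨h3, hp'⟩
    · simp [drawStarsRec, draw_stars_alt, sizesLoop]
    · obtain ⟨h0, hlt⟩ := floordiv_facts n h3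
      have hne : n ≠ 3 := by omega
      rw [alt_step n h3]
      conv_lhs => rw [drawStarsRec]
      rw [if_neg hne, ih _ hp' (by omega)]
      dsimp only
      rw [PySem.List.foldl_append_singleton_eq_map,
        PySem.List.foldl_append_singleton_eq_map, PySem.List.foldl_append_singleton_eq_map]
      simp [List.append_assoc]

-- ===== VERDICT (by name: the statement is the Claim_ definition above) =====
theorem draw_stars_spec : Claim_equal_draw_stars := by
  intro n _ hp
  unfold Spec_draw_stars draw_stars
  exact main_lemma n.natAbs n hp (le_refl _)
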